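-- pv_equiv track=rewrite | github.com/jk-jung/problem-solving | codewars/6kyu/6_Simple Fun #305: Typist.py | typist
-- ===== SOURCE A (Python) =====
-- def typist(s):
--     t = True
--     r = len(s)
--     for x in s:
--         if x.isupper() and t:
--             t = False
--             r += 1
--         if x.islower() and not t:
--             t = True
--             r += 1
--     return r
-- ===== SOURCE B (Python) =====
-- def typist(s):
--     cases = [c.isupper() for c in s if c.isupper() or c.islower()]
--     shifts = sum(a != b for a, b in zip([False] + cases, cases))
--     return len(s) + shifts
-- ===== Notes on version B (the rewrite author's own statement) =====
-- stated objective: alternative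
-- what changed: Replaces A's stateful running-toggle loop with a two-phase formulation: project the case-bits of the letters, then count adjacent differences in that sequence (with a virtual lowercase start) and add len(s).
import Mathlib
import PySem

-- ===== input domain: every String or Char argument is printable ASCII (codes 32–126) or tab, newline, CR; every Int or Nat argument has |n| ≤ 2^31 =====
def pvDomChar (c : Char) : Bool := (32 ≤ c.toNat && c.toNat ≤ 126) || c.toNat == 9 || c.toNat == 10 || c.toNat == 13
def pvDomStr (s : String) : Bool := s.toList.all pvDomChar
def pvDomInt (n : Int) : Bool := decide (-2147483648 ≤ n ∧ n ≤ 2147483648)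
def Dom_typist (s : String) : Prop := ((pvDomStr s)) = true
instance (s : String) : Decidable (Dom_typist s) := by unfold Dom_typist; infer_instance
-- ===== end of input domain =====

-- Port A = running-toggle loop; port B = project case-bits of the letters and count adjacent
-- differences with a virtual lowercase start (objective: alternative decomposition, same cost).


-- ===== PORT A =====
-- Char.isUpper/Char.isLower coincide with Python's str.isupper/str.islower on single
-- printable-ASCII characters (the stated domain).
def typistStep (st : Bool × Int) (x : Char) : Bool × Int :=
  let st1 := if x.isUpper && st.1 then (false, st.2 + 1) else st
  if x.isLower && !st1.1 then (true, st1.2 + 1) else st1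

def typist (s : String) : Int :=
  (s.toList.foldl typistStep (true, (s.toList.length : Int))).2

-- ===== PORT B =====
def typist_alt (s : String) : Int :=
  let cases := (s.toList.filter (fun c => c.isUpper || c.isLower)).map Char.isUpper
  let shifts := ((false :: cases).zip cases).foldl
    (fun acc p => acc + (if p.1 != p.2 then (1 : Int) else 0)) 0
  (s.toList.length : Int) + shifts

-- ===== PRECONDITION & SPEC =====
def Spec_typist (s : String) (out : Int) : Prop := out = typist_alt s
instance (s : String) (out : Int) : Decidable (Spec_typist s out) := by unfold Spec_typist; infer_instance

-- ===== CLAIM (what is proved, stated in full; the proofs are below) =====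
def Claim_equal_typist : Prop := ∀ (s : String), Dom_typist s → Spec_typist s (typist s)

-- ===== LEMMAS AND PROOFS =====

-- number of adjacent changes in b :: cs
def csum (b : Bool) : List Bool → Int
  | [] => 0
  | c :: cs => (if b != c then 1 else 0) + csum c cs

def lastBit (b : Bool) : List Bool → Bool
  | [] => b
  | c :: cs => lastBit c cs

def casesOf (l : List Char) : List Bool :=
  (l.filter (fun c => c.isUpper || c.isLower)).map Char.isUpper

theorem not_upper_and_lower (c : Char) (h : c.isUpper = true) : c.isLower = false := by
  simp [Char.isUpper, Char.isLower, UInt32.le_iff_toNat_le] at *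
  omega

-- A's loop computes r + csum over the case-bit sequence, starting from current mode !t.
theorem foldA_eq (l : List Char) : ∀ (t : Bool) (r : Int),
    l.foldl typistStep (t, r) = (!lastBit (!t) (casesOf l), r + csum (!t) (casesOf l)) := by
  induction l with
  | nil => intro t r; simp [lastBit, csum, casesOf]
  | cons c l ih =>
    intro t r
    by_cases hu : c.isUpper = true
    · have hl := not_upper_and_lower c hu
      cases t <;>
        simp [List.foldl_cons, typistStep, hu, hl, casesOf, ih, csum,
          lastBit] <;> ring
    · rw [Bool.not_eq_true] at hu
      by_cases hlw : c.isLower = true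
      · cases t <;>
          simp [List.foldl_cons, typistStep, hu, hlw, casesOf, ih, csum,
            lastBit] <;> ring
      · rw [Bool.not_eq_true] at hlw
        simp [List.foldl_cons, typistStep, hu, hlw, casesOf, ih]

-- B's zip-fold equals csum.
theorem zipfold_eq (cs : List Bool) : ∀ (b : Bool) (acc : Int),
    ((b :: cs).zip cs).foldl (fun acc p => acc + (if p.1 != p.2 then (1 : Int) else 0)) acc
      = acc + csum b cs := by
  induction cs with
  | nil => intro b acc; simp [csum]
  | cons c cs ih =>
    intro b acc
    simp only [List.zip_cons_cons, List.foldl_cons, csum, ih]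
    ring

-- ===== VERDICT (by name: the statement is the Claim_ definition above) =====
theorem typist_spec : Claim_equal_typist := by
  intro s _
  show typist s = typist_alt s
  simp only [typist, typist_alt, foldA_eq, zipfold_eq, casesOf, Bool.not_true]
  ring
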